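-- pv_equiv track=rewrite | github.com/Ghostvulture/DREDGE_Lowlevel | MaixAPI/apriltagmap.py | generate_map_dict
-- ===== SOURCE A (Python) =====
-- def generate_map_dict(rows=15, cols=20):
--     mapping = {}
--     num = 1
--     for row in range(1, rows + 1):
--         for col in range(1, cols + 1):
--             mapping[num] = (row, col)
--             num += 1
--     return mapping
-- ===== SOURCE B (Python) =====
-- def generate_map_dict(rows=15, cols=20):
--     total = max(rows, 0) * max(cols, 0)
--     return {n + 1: (n // cols + 1, n % cols + 1) for n in range(total)}
-- ===== Notes on version B (the rewrite author's own statement) =====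
-- stated objective: simpler
-- what changed: Replaced the nested row/col loops that maintain a running counter and mutate a dict with a single flat pass over the linear index 0..rows*cols-1, deriving key and (row, col) arithmetically via // and % in one dict comprehension.
import Mathlib
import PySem

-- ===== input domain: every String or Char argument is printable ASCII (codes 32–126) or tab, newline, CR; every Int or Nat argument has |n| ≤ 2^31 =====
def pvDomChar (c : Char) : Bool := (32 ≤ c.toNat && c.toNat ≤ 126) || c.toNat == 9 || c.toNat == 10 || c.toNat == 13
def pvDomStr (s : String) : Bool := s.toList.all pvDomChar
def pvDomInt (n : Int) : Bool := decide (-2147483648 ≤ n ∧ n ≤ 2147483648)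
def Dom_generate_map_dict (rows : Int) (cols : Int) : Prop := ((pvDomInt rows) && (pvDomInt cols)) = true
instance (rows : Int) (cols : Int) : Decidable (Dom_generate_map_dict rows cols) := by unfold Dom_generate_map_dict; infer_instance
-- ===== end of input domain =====

-- B replaces the nested row/col loops with a counter by a single flat pass over the
-- linear index, deriving (row, col) arithmetically via // and % (objective: simpler).

-- ===== PORT A =====
def generate_map_dict (rows : Int) (cols : Int) : List (Int × Int × Int) :=
  let st := (PySem.List.pyRange 1 (rows + 1) 1).foldl
    (fun (st : PySem.Dict Int (Int × Int) × Int) row =>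
      (PySem.List.pyRange 1 (cols + 1) 1).foldl
        (fun st col => (st.1.insert st.2 (row, col), st.2 + 1)) st)
    (PySem.Dict.empty, 1)
  st.1.items

-- ===== PORT B =====
def generate_map_dict_alt (rows : Int) (cols : Int) : List (Int × Int × Int) :=
  (PySem.List.pyRange 0 (max rows 0 * max cols 0) 1).map
    (fun n => (n + 1, (PySem.Int.floordiv n cols + 1, PySem.Int.mod n cols + 1)))

-- ===== PRECONDITION & SPEC =====
def Spec_generate_map_dict (rows : Int) (cols : Int) (out : List (Int × Int × Int)) : Prop := out = generate_map_dict_alt rows cols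
instance (rows : Int) (cols : Int) (out : List (Int × Int × Int)) : Decidable (Spec_generate_map_dict rows cols out) := by unfold Spec_generate_map_dict; infer_instance

-- ===== CLAIM (what is proved, stated in full; the proofs are below) =====
def Claim_equal_generate_map_dict : Prop := ∀ (rows : Int) (cols : Int), Dom_generate_map_dict rows cols → Spec_generate_map_dict rows cols (generate_map_dict rows cols)

-- ===== LEMMAS AND PROOFS =====

-- range(1, x+1) only depends on x through x.toNat
lemma pyRange_one_succ_toNat (x : Int) :
    PySem.List.pyRange 1 (x + 1) 1 = PySem.List.pyRange 1 ((x.toNat : Int) + 1) 1 := by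
  by_cases h : x ≤ 0
  · rw [PySem.List.pyRange_one_eq_nil (by omega), PySem.List.pyRange_one_eq_nil (by omega)]
  · congr 1; omega

-- one row of A's inner loop appends C fresh keys num, num+1, …, num+C-1
lemma inner_loop (row : Int) (C : Nat) :
    ∀ (d : PySem.Dict Int (Int × Int)) (num : Int),
    (∀ k, d.contains k = true → k < num) →
    (((PySem.List.pyRange 1 ((C : Int) + 1) 1).foldl
        (fun (st : PySem.Dict Int (Int × Int) × Int) col =>
          (st.1.insert st.2 (row, col), st.2 + 1)) (d, num)).1.items =
        d.items ++ (List.range C).map (fun (j : Nat) => ((num + (j : Int), (row, (j : Int) + 1)) : Int × (Int × Int))))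
    ∧ ((PySem.List.pyRange 1 ((C : Int) + 1) 1).foldl
        (fun (st : PySem.Dict Int (Int × Int) × Int) col =>
          (st.1.insert st.2 (row, col), st.2 + 1)) (d, num)).2 = num + C
    ∧ ∀ k, ((PySem.List.pyRange 1 ((C : Int) + 1) 1).foldl
        (fun (st : PySem.Dict Int (Int × Int) × Int) col =>
          (st.1.insert st.2 (row, col), st.2 + 1)) (d, num)).1.contains k = true → k < num + C := by
  induction C with
  | zero =>
    intro d num h
    rw [PySem.List.pyRange_one_eq_nil (by omega)]
    simpa using h
  | succ C ih =>
    intro d num h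
    have hcast : ((C + 1 : Nat) : Int) + 1 = ((C : Int) + 1) + 1 := by push_cast; ring
    rw [hcast, PySem.List.pyRange_one_succ_right (by omega), List.foldl_append]
    obtain ⟨hi, hn, hc⟩ := ih d num h
    have hfresh : (((PySem.List.pyRange 1 ((C : Int) + 1) 1).foldl
        (fun (st : PySem.Dict Int (Int × Int) × Int) col =>
          (st.1.insert st.2 (row, col), st.2 + 1)) (d, num)).1).contains (num + (C : Int)) = false := by
      by_contra hcon
      have := hc (num + (C : Int)) (by simpa using hcon)
      omega
    refine ⟨?_, ?_, ?_⟩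
    · simp only [List.foldl_cons, List.foldl_nil]
      rw [PySem.Dict.items_insert_of_not_contains _ _ (by rw [hn]; exact hfresh)]
      rw [hi, hn, List.range_succ]
      simp
    · simp only [List.foldl_cons, List.foldl_nil, hn]
      push_cast; ring
    · intro k hk
      simp only [List.foldl_cons, List.foldl_nil] at hk
      rw [PySem.Dict.contains_insert] at hk
      rcases Bool.or_eq_true_iff.mp hk with hk | hk
      · have : k = num + (C : Int) := by simpa [hn] using (beq_iff_eq.mp hk)
        push_cast; omega
      · have := hc k hk
        push_cast; omega

-- A's whole nested loop, characterised in closed form over R = rows.toNat, C = cols.toNat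
lemma outer_loop (cols : Int) (R : Nat) :
    (((PySem.List.pyRange 1 ((R : Int) + 1) 1).foldl
        (fun (st : PySem.Dict Int (Int × Int) × Int) row =>
          (PySem.List.pyRange 1 (cols + 1) 1).foldl
            (fun st col => (st.1.insert st.2 (row, col), st.2 + 1)) st)
        (PySem.Dict.empty, 1)).1.items =
      (List.range (R * cols.toNat)).map
        (fun (n : Nat) => ((n : Int) + 1, (((n / cols.toNat : Nat) : Int) + 1, ((n % cols.toNat : Nat) : Int) + 1))))
    ∧ ((PySem.List.pyRange 1 ((R : Int) + 1) 1).foldl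
        (fun (st : PySem.Dict Int (Int × Int) × Int) row =>
          (PySem.List.pyRange 1 (cols + 1) 1).foldl
            (fun st col => (st.1.insert st.2 (row, col), st.2 + 1)) st)
        (PySem.Dict.empty, 1)).2 = ((R * cols.toNat : Nat) : Int) + 1
    ∧ ∀ k, ((PySem.List.pyRange 1 ((R : Int) + 1) 1).foldl
        (fun (st : PySem.Dict Int (Int × Int) × Int) row =>
          (PySem.List.pyRange 1 (cols + 1) 1).foldl
            (fun st col => (st.1.insert st.2 (row, col), st.2 + 1)) st)
        (PySem.Dict.empty, 1)).1.contains k = true → k < ((R * cols.toNat : Nat) : Int) + 1 := by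
  set C := cols.toNat with hC
  induction R with
  | zero =>
    rw [show PySem.List.pyRange 1 (((0 : Nat) : Int) + 1) 1 = [] from
      PySem.List.pyRange_one_eq_nil (by norm_num)]
    refine ⟨by rw [Nat.zero_mul]; rfl, by simp, ?_⟩
    intro k hk
    simp [PySem.Dict.contains_empty] at hk
  | succ R ih =>
    have hcast : ((R + 1 : Nat) : Int) + 1 = ((R : Int) + 1) + 1 := by push_cast; ring
    rw [hcast, PySem.List.pyRange_one_succ_right (a := 1) (b := (R : Int) + 1) (by omega),
      List.foldl_append]
    obtain ⟨hi, hn, hc⟩ := ih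
    simp only [List.foldl_cons, List.foldl_nil]
    rw [pyRange_one_succ_toNat cols, ← hC] at hi hn hc ⊢
    set X := (PySem.List.pyRange 1 ((R : Int) + 1) 1).foldl
        (fun (st : PySem.Dict Int (Int × Int) × Int) row =>
          (PySem.List.pyRange 1 ((C : Int) + 1) 1).foldl
            (fun st col => (st.1.insert st.2 (row, col), st.2 + 1)) st)
        (PySem.Dict.empty, 1) with hX
    obtain ⟨hi', hn', hc'⟩ := inner_loop ((R : Int) + 1) C X.1 X.2
      (fun k hk => by rw [hn]; exact hc k hk)
    rw [show (X.1, X.2) = X from rfl] at hi' hn' hc'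
    rw [hn] at hi' hn' hc'
    refine ⟨?_, ?_, ?_⟩
    · rw [hi', hi]
      have hadd : (R + 1) * C = R * C + C := by ring
      rw [hadd, List.range_add, List.map_append, List.map_map]
      congr 1
      apply List.map_congr_left
      intro j hj
      have hjC : j < C := List.mem_range.mp hj
      have hCpos : 0 < C := by omega
      have hdiv : (R * C + j) / C = R := by
        rw [Nat.mul_comm R C, Nat.mul_add_div hCpos, Nat.div_eq_of_lt hjC]; omega
      have hmod : (R * C + j) % C = j := by
        rw [Nat.mul_comm R C, Nat.mul_add_mod, Nat.mod_eq_of_lt hjC]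
      simp only [Function.comp, hdiv, hmod]
      refine Prod.ext ?_ (Prod.ext ?_ ?_) <;> simp <;> ring
    · rw [hn']; push_cast; ring
    · intro k hk
      rw [show (R + 1) * C = R * C + C from by ring]
      have h1 := hc' k hk
      push_cast at h1 ⊢
      omega

-- ===== VERDICT (by name: the statement is the Claim_ definition above) =====
theorem generate_map_dict_spec : Claim_equal_generate_map_dict := by
  intro rows cols _
  unfold Spec_generate_map_dict generate_map_dict generate_map_dict_alt
  set R := rows.toNat with hR
  set C := cols.toNat with hCdef
  rw [pyRange_one_succ_toNat rows, ← hR]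
  obtain ⟨hi, -, -⟩ := outer_loop cols R
  rw [hi]
  have hmax : max rows 0 * max cols 0 = ((R * C : Nat) : Int) := by
    push_cast
    rw [← Int.toNat_eq_max, ← Int.toNat_eq_max, ← hR, ← hCdef]
  rw [hmax, PySem.List.pyRange_one]
  simp only [sub_zero, Int.toNat_natCast, List.map_map]
  rw [← hCdef]
  apply List.map_congr_left
  intro k hk
  have hkRC : k < R * C := List.mem_range.mp hk
  have hCpos : 0 < C := by
    rcases Nat.eq_zero_or_pos C with h0 | h0
    · rw [h0, Nat.mul_zero] at hkRC; omega
    · exact h0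
  have hcols : cols = (C : Int) := by omega
  simp only [Function.comp, zero_add, hcols]
  simp [PySem.Int.floordiv_natCast, PySem.Int.mod_natCast]
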